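-- pv_equiv track=rewrite | github.com/kdk0411/Coding_Test_Study | LV.02/귤 고르기.py | solution
-- ===== SOURCE A (Python) =====
-- from collections import Counter
--
-- def solution(k, tangerine):
--   ret, num = 0, 0
--   cnt = Counter(tangerine)
--   # Counter 함수를 이용하여 딕셔너리를 만든 후 각 원소의 개수를 측정
--   sort_cnt = sorted(cnt.items(), key=lambda x: x[1], reverse=True)
--   # sorted를 이용하여 key값에 따라 역순으로 배치
--   for i in sort_cnt:
--     # 가장 많은 것을 전체 수용가능한 부분에서 뺀 뒤 남은 자리를 찾아야함
--     k -= i[1]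
--     # 여기서 ret은 cnt와 같이 몇번의 경우의 수인지 측정
--     ret += 1
--     if k <= 0:
--     # k 즉 최대 수용가능한 수가 0보다 작거나 같을때 멈춘다.
--       break
--   return ret
-- ===== SOURCE B (Python) =====
-- from collections import Counter
--
-- def solution(k, tangerine):
--     cnt = Counter(tangerine)
--     if not cnt:
--         return 0
--     # bucket-count: buckets[f] = number of distinct sizes occurring exactly f times
--     buckets = Counter(cnt.values())
--     maxf = max(cnt.values())
--     ret = 0
--     for f in range(maxf, 0, -1):
--         for _ in range(buckets[f]):
--             k -= f
--             ret += 1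
--             if k <= 0:
--                 return ret
--     return ret
-- ===== Notes on version B (the rewrite author's own statement) =====
-- stated objective: faster
-- what changed: Replaces A's sort of the (size,count) pairs by descending count with bucket counting: a second Counter over the frequencies plus a single downward scan over frequency values, so no comparison sort is performed.
import Mathlib
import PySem

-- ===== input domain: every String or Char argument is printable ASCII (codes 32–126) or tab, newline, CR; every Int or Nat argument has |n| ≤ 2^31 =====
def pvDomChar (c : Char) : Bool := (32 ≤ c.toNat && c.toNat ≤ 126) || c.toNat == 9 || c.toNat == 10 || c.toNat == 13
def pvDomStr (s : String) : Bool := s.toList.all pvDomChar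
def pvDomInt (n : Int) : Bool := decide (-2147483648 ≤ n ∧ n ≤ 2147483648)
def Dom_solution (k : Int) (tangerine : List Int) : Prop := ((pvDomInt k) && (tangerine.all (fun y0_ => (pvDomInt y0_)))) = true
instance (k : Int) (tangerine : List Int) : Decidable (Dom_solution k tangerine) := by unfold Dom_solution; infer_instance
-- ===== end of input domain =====

-- B replaces A's descending sort of the (size,count) pairs by bucket counting over the
-- frequencies (a second Counter plus one downward scan) — no comparison sort.

-- ===== PORT A =====
-- 'for i in sort_cnt: k -= i[1]; ret += 1; if k <= 0: break'
def solLoopA (ret k : Int) : List (Int × Int) → Int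
  | [] => ret
  | i :: rest =>
      let k' := k - i.2
      let ret' := ret + 1
      if k' ≤ 0 then ret' else solLoopA ret' k' rest

def solution (k : Int) (tangerine : List Int) : Int :=
  let cnt := PySem.Dict.counter tangerine
  let sortCnt := PySem.List.sorted cnt.items (fun x => x.2) true
  solLoopA 0 k sortCnt

-- ===== PORT B =====
-- inner 'for _ in range(buckets[f]): k -= f; ret += 1; if k <= 0: return ret'
-- (Sum.inl = early return with the answer, Sum.inr = loop ended with new (k, ret))
def solInnerB (f : Int) : Nat → Int → Int → (Int ⊕ (Int × Int))
  | 0, k, ret => Sum.inr (k, ret)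
  | n + 1, k, ret =>
      let k' := k - f
      let ret' := ret + 1
      if k' ≤ 0 then Sum.inl ret' else solInnerB f n k' ret'

-- outer 'for f in range(maxf, 0, -1)'
def solOuterB (buckets : PySem.Dict Int Int) : List Int → Int → Int → Int
  | [], _, ret => ret
  | f :: fs, k, ret =>
      match solInnerB f (buckets.getD f 0).toNat k ret with
      | Sum.inl r => r
      | Sum.inr (k', ret') => solOuterB buckets fs k' ret'

def solution_alt (k : Int) (tangerine : List Int) : Int :=
  let cnt := PySem.Dict.counter tangerine
  if cnt.items = [] then 0
  else
    let buckets := PySem.Dict.counter cnt.values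
    -- cnt is nonempty in this branch, so max? is some; .getD 0 only makes the port total
    let maxf := (PySem.List.max? cnt.values (fun x => x)).getD 0
    solOuterB buckets (PySem.List.pyRange maxf 0 (-1)) k 0

-- ===== PRECONDITION & SPEC =====
def Spec_solution (k : Int) (tangerine : List Int) (out : Int) : Prop := out = solution_alt k tangerine
instance (k : Int) (tangerine : List Int) (out : Int) : Decidable (Spec_solution k tangerine out) := by unfold Spec_solution; infer_instance

-- ===== CLAIM (what is proved, stated in full; the proofs are below) =====
def Claim_equal_solution : Prop := ∀ (k : Int) (tangerine : List Int), Dom_solution k tangerine → Spec_solution k tangerine (solution k tangerine)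

-- ===== LEMMAS AND PROOFS =====

-- the common core: the subtract/increment/break loop over a bare list of counts
def runC (ret k : Int) : List Int → Int
  | [] => ret
  | c :: cs =>
      let k' := k - c
      let ret' := ret + 1
      if k' ≤ 0 then ret' else runC ret' k' cs

theorem solLoopA_eq_runC (l : List (Int × Int)) : ∀ (ret k : Int),
    solLoopA ret k l = runC ret k (l.map (·.2)) := by
  induction l with
  | nil => intro ret k; rfl
  | cons i rest ih =>
      intro ret k
      simp only [solLoopA, List.map_cons, runC]
      split_ifs with h
      · rfl
      · exact ih _ _

theorem runC_replicate (n : Nat) (f : Int) : ∀ (ret k : Int) (rest : List Int),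
    runC ret k (List.replicate n f ++ rest) =
      match solInnerB f n k ret with
      | Sum.inl r => r
      | Sum.inr (k', ret') => runC ret' k' rest := by
  induction n with
  | zero => intro ret k rest; rfl
  | succ n ih =>
      intro ret k rest
      simp only [List.replicate_succ, List.cons_append, runC, solInnerB]
      split_ifs with h
      · rfl
      · exact ih _ _ _

theorem solOuterB_eq_runC (buckets : PySem.Dict Int Int) (fs : List Int) :
    ∀ (k ret : Int),
      solOuterB buckets fs k ret =
        runC ret k (fs.flatMap (fun f => List.replicate ((buckets.getD f 0).toNat) f)) := by
  induction fs with
  | nil => intro k ret; rfl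
  | cons f fs ih =>
      intro k ret
      simp only [solOuterB, List.flatMap_cons]
      rw [runC_replicate]
      cases h : solInnerB f (buckets.getD f 0).toNat k ret with
      | inl r => rfl
      | inr p => cases p with | mk k' ret' => exact ih k' ret'

-- counting in a flatMap of replicates over a nodup list of block values
theorem count_flatMap_replicate (g : Int → Nat) (v : Int) :
    ∀ (fs : List Int), fs.Nodup →
      (fs.flatMap (fun f => List.replicate (g f) f)).count v =
        if v ∈ fs then g v else 0 := by
  intro fs
  induction fs with
  | nil => intro _; simp
  | cons f fs ih =>
      intro hnd
      rcases List.nodup_cons.mp hnd with ⟨hf, hnd'⟩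
      simp only [List.flatMap_cons, List.count_append, List.count_replicate, ih hnd',
        List.mem_cons]
      by_cases hv : v = f
      · subst hv; simp [hf]
      · have h1 : ¬ (f = v) := fun h => hv h.symm
        simp [hv, h1]

theorem pairwise_ge_flatMap_replicate (g : Int → Nat) :
    ∀ (fs : List Int), fs.Pairwise (fun a b => b < a) →
      (fs.flatMap (fun f => List.replicate (g f) f)).Pairwise (fun a b => b ≤ a) := by
  intro fs
  induction fs with
  | nil => intro _; simp
  | cons f fs ih =>
      intro hp
      rcases List.pairwise_cons.mp hp with ⟨hf, hp'⟩
      simp only [List.flatMap_cons]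
      rw [List.pairwise_append]
      refine ⟨?_, ih hp', ?_⟩
      · simp [List.pairwise_replicate]
      · intro a ha b hb
        rcases List.eq_of_mem_replicate ha with rfl
        rcases List.mem_flatMap.mp hb with ⟨f', hf', hb'⟩
        rcases List.eq_of_mem_replicate hb' with rfl
        exact le_of_lt (hf _ hf')

-- every value of Counter(t) is positive
theorem counter_values_pos (t : List Int) :
    ∀ v ∈ (PySem.Dict.counter t).values, 0 < v := by
  intro v hv
  have : (PySem.Dict.counter t).values
      = (PySem.Set.ofList t).map (fun x => ((t.count x : Nat) : Int)) := by
    show ((PySem.Dict.counter t).items).map (·.2) = _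
    rw [PySem.Dict.items_counter]
    simp
  rw [this] at hv
  rcases List.mem_map.mp hv with ⟨x, hx, rfl⟩
  have hxt : x ∈ t := (PySem.Set.mem_ofList t x).mp hx
  have : 0 < t.count x := List.count_pos_iff.mpr hxt
  exact_mod_cast this

-- descending pairwise of the negative-step range
theorem pairwise_gt_pyRange_neg_one (a b : Int) :
    (PySem.List.pyRange a b (-1)).Pairwise (fun x y => y < x) := by
  rw [PySem.List.pyRange_neg_one_eq_reverse]
  rw [List.pairwise_reverse]
  exact PySem.List.pairwise_lt_pyRange_one _ _

theorem nodup_pyRange_neg_one (a b : Int) : (PySem.List.pyRange a b (-1)).Nodup := by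
  rw [PySem.List.pyRange_neg_one_eq_reverse]
  exact List.nodup_reverse.mpr (PySem.List.nodup_pyRange_one _ _)

-- the crux: A's descending count list equals B's bucket-expanded count list
theorem count_lists_eq (t : List Int) (maxf : Int)
    (hmax : PySem.List.max? (PySem.Dict.counter t).values (fun x => x) = some maxf) :
    ((PySem.List.sorted (PySem.Dict.counter t).items (fun x => x.2) true).map (·.2))
      = (PySem.List.pyRange maxf 0 (-1)).flatMap
          (fun f => List.replicate (((PySem.Dict.counter (PySem.Dict.counter t).values).getD f 0).toNat) f) := by
  set values := (PySem.Dict.counter t).values with hvals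
  -- simplify B's block sizes to plain counts
  have hfun : (fun f : Int => List.replicate (((PySem.Dict.counter values).getD f 0).toNat) f)
      = (fun f => List.replicate (values.count f) f) := by
    funext f
    rw [PySem.Dict.getD_counter]
    simp
  rw [hfun]
  -- both sides are perms of values
  have hpermA : ((PySem.List.sorted (PySem.Dict.counter t).items (fun x => x.2) true).map (·.2)).Perm values := by
    exact (PySem.List.sorted_perm _ _ _).map _
  have hmemrange : ∀ v : Int, v ∈ PySem.List.pyRange maxf 0 (-1) ↔ 0 < v ∧ v ≤ maxf := by
    intro v; exact PySem.List.mem_pyRange_neg_one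
  have hpermB : ((PySem.List.pyRange maxf 0 (-1)).flatMap
      (fun f => List.replicate (values.count f) f)).Perm values := by
    rw [List.perm_iff_count]
    intro v
    rw [count_flatMap_replicate (fun f => values.count f) v _ (nodup_pyRange_neg_one _ _)]
    by_cases hv : v ∈ PySem.List.pyRange maxf 0 (-1)
    · simp [hv]
    · have : v ∉ values := by
        intro hvv
        apply hv
        rw [hmemrange]
        exact ⟨counter_values_pos t v hvv, PySem.List.max?_isMax hmax v hvv⟩
      simp [hv, List.count_eq_zero.mpr this]
  -- both sides descending
  have hpA : ((PySem.List.sorted (PySem.Dict.counter t).items (fun x => x.2) true).map (·.2)).Pairwise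
      (fun a b => b ≤ a) := by
    exact List.Pairwise.map _ (fun a b h => h) (PySem.List.sorted_pairwise_rev _ _)
  have hpB : ((PySem.List.pyRange maxf 0 (-1)).flatMap
      (fun f => List.replicate (values.count f) f)).Pairwise (fun a b => b ≤ a) := by
    exact pairwise_ge_flatMap_replicate _ _ (pairwise_gt_pyRange_neg_one _ _)
  exact List.Perm.eq_of_pairwise (fun a b _ _ h1 h2 => le_antisymm h2 h1) hpA hpB
    (hpermA.trans hpermB.symm)

-- ===== VERDICT (by name: the statement is the Claim_ definition above) =====
theorem solution_spec : Claim_equal_solution := by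
  intro k t _
  unfold Spec_solution solution solution_alt
  by_cases ht : (PySem.Dict.counter t).items = []
  · simp only [ht, if_pos]
    rfl
  · simp only [ht, if_false]
    have hvne : (PySem.Dict.counter t).values ≠ [] := by
      simpa [PySem.Dict.values, List.map_eq_nil_iff] using ht
    obtain ⟨m, hm⟩ : ∃ m, PySem.List.max? (PySem.Dict.counter t).values (fun x => x) = some m := by
      cases h : PySem.List.max? (PySem.Dict.counter t).values (fun x => x) with
      | none => exact absurd ((PySem.List.max?_eq_none_iff _ _).mp h) hvne
      | some m => exact ⟨m, rfl⟩
    rw [solLoopA_eq_runC, solOuterB_eq_runC, hm]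
    simp only [Option.getD_some]
    rw [count_lists_eq t m hm]
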